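-- pv_equiv track=rewrite | github.com/mhshawonn/Machine-Learning | Lab03/solution.py | calculate_timekeeper_energy
-- ===== SOURCE A (Python) =====
-- def calculate_timekeeper_energy(m: int, n: int, l: int, t: int) -> int:
--     total_energy = 0
--     for i in range(m):
--         for j in range(n):
--             energy = i ^ j
--             if energy > l:
--                 total_energy += energy
--     return total_energy % t
-- ===== SOURCE B (Python) =====
-- def calculate_timekeeper_energy(m: int, n: int, l: int, t: int) -> int:
--     # Bitwise divide-and-conquer: rows(i, n, v) returns ((cnt, sum) for threshold v,
--     # (cnt, sum) for threshold v-1) over j in [0, n), e = i ^ j, counting/summing e > threshold.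
--     # Computing both adjacent thresholds at once keeps a single recursive call per level,
--     # so each row costs O(log n) instead of O(n).
--     def rows(i, n, v):
--         if n <= 0:
--             return ((0, 0), (0, 0))
--         h, r = divmod(n, 2)
--         i1, b0 = divmod(i, 2)
--         w = v >> 1
--         p = rows(i1, h, w)
--
--         def one(lv):
--             cnt = tot = 0
--             for d in (0, 1):
--                 b = b0 ^ d
--                 c, s = p[0] if (lv - b) >> 1 == w else p[1]
--                 cnt += c
--                 tot += 2 * s + b * c
--             if r:
--                 e = i ^ (n - 1)
--                 if e > lv:
--                     cnt += 1
--                     tot += e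
--             return (cnt, tot)
--
--         return (one(v), one(v - 1))
--
--     total = 0
--     for i in range(m):
--         total += rows(i, n, l)[0][1]
--     return total % t
-- ===== Notes on version B (the rewrite author's own statement) =====
-- stated objective: faster
-- what changed: Replaced the O(m*n) double loop with a bitwise divide-and-conquer on the bits of j that computes each row's thresholded XOR count/sum for two adjacent thresholds at once in O(log n) per row.
import Mathlib
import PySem

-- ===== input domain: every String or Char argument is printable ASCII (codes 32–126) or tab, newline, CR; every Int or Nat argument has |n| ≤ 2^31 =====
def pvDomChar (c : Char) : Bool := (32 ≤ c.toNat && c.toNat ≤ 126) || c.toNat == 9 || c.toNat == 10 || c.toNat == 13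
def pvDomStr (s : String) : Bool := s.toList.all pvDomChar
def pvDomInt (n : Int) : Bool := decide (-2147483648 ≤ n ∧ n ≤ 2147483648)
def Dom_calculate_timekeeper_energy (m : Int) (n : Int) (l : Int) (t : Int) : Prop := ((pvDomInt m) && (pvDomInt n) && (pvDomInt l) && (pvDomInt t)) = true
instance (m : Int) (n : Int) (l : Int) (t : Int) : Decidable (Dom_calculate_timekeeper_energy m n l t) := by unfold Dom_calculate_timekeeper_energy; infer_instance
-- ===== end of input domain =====

-- B replaces A's O(m·n) double loop by a bitwise divide-and-conquer that computes each row's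
-- thresholded XOR sum in O(log n) per row (objective: faster).


-- ===== PORT A =====
def calculate_timekeeper_energy (m : Int) (n : Int) (l : Int) (t : Int) : Int :=
  let total_energy :=
    (PySem.List.pyRange 0 m 1).foldl (fun acc i =>
      (PySem.List.pyRange 0 n 1).foldl (fun acc2 j =>
        let energy := PySem.Int.bxor i j
        if energy > l then acc2 + energy else acc2) acc) 0
  PySem.Int.mod total_energy t

-- ===== PORT B =====
-- Source B's inner `one(lv)`: the two low-bit branches d = 0, 1 plus the odd tail.
def pvOne (i n b0 r w : Int) (p : (Int × Int) × (Int × Int)) (lv : Int) : Int × Int :=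
  let cs := ([0, 1] : List Int).foldl (fun (acc : Int × Int) d =>
    let b := PySem.Int.bxor b0 d
    let q := if PySem.Int.floordiv (lv - b) 2 = w then p.1 else p.2
    (acc.1 + q.1, acc.2 + 2 * q.2 + b * q.1)) (0, 0)
  if r = 1 then
    let e := PySem.Int.bxor i (n - 1)
    if e > lv then (cs.1 + 1, cs.2 + e) else cs
  else cs

-- Source B's `rows`: ((cnt, sum) for threshold v, (cnt, sum) for threshold v-1) over j ∈ [0, n), e = i ^ j, e > threshold.
def pvRows (i n v : Int) : (Int × Int) × (Int × Int) :=
  if hn : n ≤ 0 then ((0, 0), (0, 0))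
  else
    let h := PySem.Int.floordiv n 2
    let r := PySem.Int.mod n 2
    let i1 := PySem.Int.floordiv i 2
    let b0 := PySem.Int.mod i 2
    let w := PySem.Int.floordiv v 2
    let p := pvRows i1 h w
    (pvOne i n b0 r w p v, pvOne i n b0 r w p (v - 1))
termination_by n.toNat
decreasing_by
  have h2 : PySem.Int.floordiv n 2 = n / 2 := PySem.Int.floordiv_eq_ediv_of_pos (by norm_num)
  simp only [h2]
  omega

def calculate_timekeeper_energy_alt (m : Int) (n : Int) (l : Int) (t : Int) : Int :=
  let total :=
    (PySem.List.pyRange 0 m 1).foldl (fun acc i => acc + (pvRows i n l).1.2) 0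
  PySem.Int.mod total t

-- ===== PRECONDITION & SPEC =====
-- Pre_ excludes only t = 0, where Python's `total_energy % t` raises ZeroDivisionError.
def Pre_calculate_timekeeper_energy (m : Int) (n : Int) (l : Int) (t : Int) : Prop := t ≠ 0
instance (m : Int) (n : Int) (l : Int) (t : Int) : Decidable (Pre_calculate_timekeeper_energy m n l t) := by unfold Pre_calculate_timekeeper_energy; infer_instance
def pvWitness_calculate_timekeeper_energy : Int × Int × Int × Int := (4, 5, 2, 97)

def Spec_calculate_timekeeper_energy (m : Int) (n : Int) (l : Int) (t : Int) (out : Int) : Prop := out = calculate_timekeeper_energy_alt m n l t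
instance (m : Int) (n : Int) (l : Int) (t : Int) (out : Int) : Decidable (Spec_calculate_timekeeper_energy m n l t out) := by unfold Spec_calculate_timekeeper_energy; infer_instance

-- ===== CLAIM (what is proved, stated in full; the proofs are below) =====
def Claim_equal_calculate_timekeeper_energy : Prop := ∀ (m : Int) (n : Int) (l : Int) (t : Int), Dom_calculate_timekeeper_energy m n l t → Pre_calculate_timekeeper_energy m n l t → Spec_calculate_timekeeper_energy m n l t (calculate_timekeeper_energy m n l t)

-- ===== LEMMAS AND PROOFS =====

-- Specification values: count and sum of e = i ^^^ j over j < N with (e : Int) > lv.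
def pvC (i N : Nat) (lv : Int) : Int :=
  ((List.range N).map (fun j => if ((i ^^^ j : Nat) : Int) > lv then (1 : Int) else 0)).sum
def pvS (i N : Nat) (lv : Int) : Int :=
  ((List.range N).map (fun j => if ((i ^^^ j : Nat) : Int) > lv then ((i ^^^ j : Nat) : Int) else 0)).sum

lemma pvC_def (i N : Nat) (lv : Int) :
    pvC i N lv = ((List.range N).map (fun j => if ((i ^^^ j : Nat) : Int) > lv then (1 : Int) else 0)).sum := rfl
lemma pvS_def (i N : Nat) (lv : Int) :
    pvS i N lv = ((List.range N).map (fun j => if ((i ^^^ j : Nat) : Int) > lv then ((i ^^^ j : Nat) : Int) else 0)).sum := rfl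

lemma pv_xor_two_mul (a c b d : Nat) (hb : b < 2) (hd : d < 2) :
    (2 * a + b) ^^^ (2 * c + d) = 2 * (a ^^^ c) + (b ^^^ d) := by
  interval_cases b <;> interval_cases d <;>
  · first
    | simpa [Nat.bit, mul_comm] using Nat.xor_bit false a false c
    | simpa [Nat.bit, mul_comm] using Nat.xor_bit false a true c
    | simpa [Nat.bit, mul_comm] using Nat.xor_bit true a false c
    | simpa [Nat.bit, mul_comm] using Nat.xor_bit true a true c

lemma pv_thresh (x b : Nat) (lv : Int) :
    (((2 * x + b : Nat) : Int) > lv) ↔ ((x : Int) > PySem.Int.floordiv (lv - b) 2) := by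
  have h1 := PySem.Int.floordiv_mul_add_mod (lv - (b : Int)) 2
  have h2 : 0 ≤ PySem.Int.mod (lv - (b : Int)) 2 := PySem.Int.mod_nonneg _ (by norm_num)
  have h3 : PySem.Int.mod (lv - (b : Int)) 2 < 2 := PySem.Int.mod_lt _ (by norm_num)
  push_cast
  omega

lemma pv_w_cases (v lv b : Int) (hlv : lv = v ∨ lv = v - 1) (hb : b = 0 ∨ b = 1) :
    PySem.Int.floordiv (lv - b) 2 = PySem.Int.floordiv v 2 ∨
    PySem.Int.floordiv (lv - b) 2 = PySem.Int.floordiv v 2 - 1 := by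
  have h1 := PySem.Int.floordiv_mul_add_mod v 2
  have h2 : 0 ≤ PySem.Int.mod v 2 := PySem.Int.mod_nonneg _ (by norm_num)
  have h3 : PySem.Int.mod v 2 < 2 := PySem.Int.mod_lt _ (by norm_num)
  have h4 := PySem.Int.floordiv_mul_add_mod (lv - b) 2
  have h5 : 0 ≤ PySem.Int.mod (lv - b) 2 := PySem.Int.mod_nonneg _ (by norm_num)
  have h6 : PySem.Int.mod (lv - b) 2 < 2 := PySem.Int.mod_lt _ (by norm_num)
  omega

lemma pv_sum_map_add (f g : Nat → Int) (L : List Nat) :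
    (L.map (fun x => f x + g x)).sum = (L.map f).sum + (L.map g).sum := by
  induction L with
  | nil => simp
  | cons x xs ih => simp [ih]; ring

lemma pv_sum_map_mul (a : Int) (f : Nat → Int) (L : List Nat) :
    (L.map (fun x => a * f x)).sum = a * (L.map f).sum := by
  induction L with
  | nil => simp
  | cons x xs ih => simp [ih]; ring

lemma pv_pair_sum (f : Nat → Int) (h : Nat) :
    ((List.range (2 * h)).map f).sum = ((List.range h).map (fun c => f (2 * c) + f (2 * c + 1))).sum := by
  induction h with
  | zero => simp
  | succ k ih =>
      have h2 : 2 * (k + 1) = (2 * k + 1) + 1 := by ring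
      rw [h2, List.range_succ, List.range_succ, List.range_succ]
      simp only [List.map_append, List.sum_append, List.map_cons, List.map_nil, List.sum_cons,
        List.sum_nil, ih]
      ring

lemma pv_mod2_lt (i : Nat) : i % 2 < 2 := Nat.mod_lt _ (by norm_num)
lemma pv_xorbit_lt (i : Nat) : (i % 2) ^^^ 1 < 2 := by
  rcases Nat.mod_two_eq_zero_or_one i with h | h <;> simp [h]

-- Generic low-bit split of the thresholded sum over j < 2*H.
lemma pv_core (i H : Nat) (lv : Int) (G : Nat → Int) :
    ((List.range (2 * H)).map (fun j => if ((i ^^^ j : Nat) : Int) > lv then G (i ^^^ j) else 0)).sum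
    = ((List.range H).map (fun c =>
        if ((i / 2 ^^^ c : Nat) : Int) > PySem.Int.floordiv (lv - ((i % 2 : Nat) : Int)) 2
        then G (2 * (i / 2 ^^^ c) + i % 2) else 0)).sum
    + ((List.range H).map (fun c =>
        if ((i / 2 ^^^ c : Nat) : Int) > PySem.Int.floordiv (lv - (((i % 2) ^^^ 1 : Nat) : Int)) 2
        then G (2 * (i / 2 ^^^ c) + ((i % 2) ^^^ 1)) else 0)).sum := by
  rw [pv_pair_sum, ← pv_sum_map_add]
  apply congrArg
  apply List.map_congr_left
  intro c _
  have hi : 2 * (i / 2) + i % 2 = i := Nat.div_add_mod i 2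
  have e0 : i ^^^ (2 * c) = 2 * (i / 2 ^^^ c) + (i % 2 ^^^ 0) := by
    conv_lhs => rw [← hi]
    exact pv_xor_two_mul (i / 2) c (i % 2) 0 (pv_mod2_lt i) (by norm_num)
  have e1 : i ^^^ (2 * c + 1) = 2 * (i / 2 ^^^ c) + (i % 2 ^^^ 1) := by
    conv_lhs => rw [← hi]
    exact pv_xor_two_mul (i / 2) c (i % 2) 1 (pv_mod2_lt i) (by norm_num)
  rw [e0, e1, Nat.xor_zero]
  congr 1
  · rw [if_congr (pv_thresh (i / 2 ^^^ c) (i % 2) lv) rfl rfl]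
  · rw [if_congr (pv_thresh (i / 2 ^^^ c) (i % 2 ^^^ 1) lv) rfl rfl]

lemma pv_tailC (i M : Nat) (lv : Int) :
    pvC i (M + 1) lv = pvC i M lv + (if ((i ^^^ M : Nat) : Int) > lv then 1 else 0) := by
  unfold pvC
  rw [List.range_succ]
  simp

lemma pv_tailS (i M : Nat) (lv : Int) :
    pvS i (M + 1) lv = pvS i M lv + (if ((i ^^^ M : Nat) : Int) > lv then ((i ^^^ M : Nat) : Int) else 0) := by
  unfold pvS
  rw [List.range_succ]
  simp

lemma pv_evenC (i H : Nat) (lv : Int) :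
    pvC i (2 * H) lv
    = pvC (i / 2) H (PySem.Int.floordiv (lv - ((i % 2 : Nat) : Int)) 2)
      + pvC (i / 2) H (PySem.Int.floordiv (lv - (((i % 2) ^^^ 1 : Nat) : Int)) 2) := by
  unfold pvC
  exact pv_core i H lv (fun _ => (1 : Int))

lemma pv_evenS (i H : Nat) (lv : Int) :
    pvS i (2 * H) lv
    = (2 * pvS (i / 2) H (PySem.Int.floordiv (lv - ((i % 2 : Nat) : Int)) 2)
        + ((i % 2 : Nat) : Int) * pvC (i / 2) H (PySem.Int.floordiv (lv - ((i % 2 : Nat) : Int)) 2))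
      + (2 * pvS (i / 2) H (PySem.Int.floordiv (lv - (((i % 2) ^^^ 1 : Nat) : Int)) 2)
        + (((i % 2) ^^^ 1 : Nat) : Int) * pvC (i / 2) H (PySem.Int.floordiv (lv - (((i % 2) ^^^ 1 : Nat) : Int)) 2)) := by
  have hpt : ∀ (b : Nat) (lb : Int),
      ((List.range H).map (fun c =>
        if ((i / 2 ^^^ c : Nat) : Int) > lb then ((2 * (i / 2 ^^^ c) + b : Nat) : Int) else 0)).sum
      = 2 * pvS (i / 2) H lb + (b : Int) * pvC (i / 2) H lb := by
    intro b lb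
    have hpw : ((List.range H).map (fun c =>
        if ((i / 2 ^^^ c : Nat) : Int) > lb then ((2 * (i / 2 ^^^ c) + b : Nat) : Int) else 0)).sum
      = ((List.range H).map (fun c =>
          2 * (if ((i / 2 ^^^ c : Nat) : Int) > lb then ((i / 2 ^^^ c : Nat) : Int) else 0)
          + (b : Int) * (if ((i / 2 ^^^ c : Nat) : Int) > lb then (1 : Int) else 0))).sum := by
      apply congrArg
      apply List.map_congr_left
      intro c _
      split_ifs <;> push_cast <;> ring
    have h1 := pv_sum_map_add
      (fun c => 2 * (if ((i / 2 ^^^ c : Nat) : Int) > lb then ((i / 2 ^^^ c : Nat) : Int) else 0))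
      (fun c => (b : Int) * (if ((i / 2 ^^^ c : Nat) : Int) > lb then (1 : Int) else 0)) (List.range H)
    have h2 := pv_sum_map_mul 2
      (fun c => (if ((i / 2 ^^^ c : Nat) : Int) > lb then ((i / 2 ^^^ c : Nat) : Int) else 0)) (List.range H)
    have h3 := pv_sum_map_mul (b : Int)
      (fun c => (if ((i / 2 ^^^ c : Nat) : Int) > lb then (1 : Int) else 0)) (List.range H)
    rw [hpw, h1, h2, h3, pvS_def, pvC_def]
  conv_lhs => rw [pvS_def]
  rw [pv_core i H lv (fun e => (e : Int)), hpt (i % 2), hpt ((i % 2) ^^^ 1)]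

lemma pvC_split (i N : Nat) (hN : 0 < N) (lv : Int) :
    pvC i N lv =
      pvC (i / 2) (N / 2) (PySem.Int.floordiv (lv - ((i % 2 : Nat) : Int)) 2)
      + pvC (i / 2) (N / 2) (PySem.Int.floordiv (lv - (((i % 2) ^^^ 1 : Nat) : Int)) 2)
      + (if N % 2 = 1 ∧ ((i ^^^ (N - 1) : Nat) : Int) > lv then 1 else 0) := by
  rcases Nat.mod_two_eq_zero_or_one N with hR | hR
  · have h2 : 2 * (N / 2) = N := by omega
    conv_lhs => rw [← h2]
    rw [pv_evenC]
    simp [hR]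
  · have h2 : N = 2 * (N / 2) + 1 := by omega
    have ht : N - 1 = 2 * (N / 2) := by omega
    conv_lhs => rw [h2]
    rw [pv_tailC, pv_evenC, ht]
    simp [hR]

lemma pvS_split (i N : Nat) (hN : 0 < N) (lv : Int) :
    pvS i N lv =
      (2 * pvS (i / 2) (N / 2) (PySem.Int.floordiv (lv - ((i % 2 : Nat) : Int)) 2)
        + ((i % 2 : Nat) : Int) * pvC (i / 2) (N / 2) (PySem.Int.floordiv (lv - ((i % 2 : Nat) : Int)) 2))
      + (2 * pvS (i / 2) (N / 2) (PySem.Int.floordiv (lv - (((i % 2) ^^^ 1 : Nat) : Int)) 2)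
        + (((i % 2) ^^^ 1 : Nat) : Int) * pvC (i / 2) (N / 2) (PySem.Int.floordiv (lv - (((i % 2) ^^^ 1 : Nat) : Int)) 2))
      + (if N % 2 = 1 ∧ ((i ^^^ (N - 1) : Nat) : Int) > lv then ((i ^^^ (N - 1) : Nat) : Int) else 0) := by
  rcases Nat.mod_two_eq_zero_or_one N with hR | hR
  · have h2 : 2 * (N / 2) = N := by omega
    conv_lhs => rw [← h2]
    rw [pv_evenS]
    simp [hR]
  · have h2 : N = 2 * (N / 2) + 1 := by omega
    have ht : N - 1 = 2 * (N / 2) := by omega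
    conv_lhs => rw [h2]
    rw [pv_tailS, pv_evenS, ht]
    simp [hR]

lemma pv_fdiv_natCast (N : Nat) : PySem.Int.floordiv (N : Int) 2 = ((N / 2 : Nat) : Int) := by
  rw [PySem.Int.floordiv_eq_ediv_of_pos (by norm_num)]
  omega

lemma pv_mod_natCastN (N : Nat) : PySem.Int.mod (N : Int) 2 = ((N % 2 : Nat) : Int) := by
  rw [PySem.Int.mod_eq_emod_of_pos (by norm_num)]
  omega

lemma pv_bxor_natCast (a b : Nat) : PySem.Int.bxor (a : Int) (b : Int) = ((a ^^^ b : Nat) : Int) :=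
  PySem.Int.bxor_natCast a b

lemma pvOne_correct (i N : Nat) (hN : 0 < N) (v lv : Int) (hlv : lv = v ∨ lv = v - 1) :
    pvOne (i : Int) (N : Int) ((i % 2 : Nat) : Int) ((N % 2 : Nat) : Int) (PySem.Int.floordiv v 2)
      ((pvC (i / 2) (N / 2) (PySem.Int.floordiv v 2), pvS (i / 2) (N / 2) (PySem.Int.floordiv v 2)),
       (pvC (i / 2) (N / 2) (PySem.Int.floordiv v 2 - 1), pvS (i / 2) (N / 2) (PySem.Int.floordiv v 2 - 1)))
      lv
    = (pvC i N lv, pvS i N lv) := by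
  have hq : ∀ (b : Nat), b < 2 →
      (if PySem.Int.floordiv (lv - (b : Int)) 2 = PySem.Int.floordiv v 2
       then (pvC (i / 2) (N / 2) (PySem.Int.floordiv v 2), pvS (i / 2) (N / 2) (PySem.Int.floordiv v 2))
       else (pvC (i / 2) (N / 2) (PySem.Int.floordiv v 2 - 1), pvS (i / 2) (N / 2) (PySem.Int.floordiv v 2 - 1)))
      = (pvC (i / 2) (N / 2) (PySem.Int.floordiv (lv - (b : Int)) 2),
         pvS (i / 2) (N / 2) (PySem.Int.floordiv (lv - (b : Int)) 2)) := by
    intro b hb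
    split_ifs with h
    · rw [h]
    · rcases pv_w_cases v lv (b : Int) hlv (by interval_cases b <;> simp) with h2 | h2
      · exact absurd h2 h
      · rw [h2]
  have hb0 : PySem.Int.bxor ((i % 2 : Nat) : Int) 0 = ((i % 2 : Nat) : Int) := by
    simp
  have hb1 : PySem.Int.bxor ((i % 2 : Nat) : Int) 1 = (((i % 2) ^^^ 1 : Nat) : Int) := by
    simpa using pv_bxor_natCast (i % 2) 1
  have he : PySem.Int.bxor (i : Int) ((N : Int) - 1) = ((i ^^^ (N - 1) : Nat) : Int) := by
    have h1 : ((N : Int) - 1) = ((N - 1 : Nat) : Int) := by omega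
    rw [h1]; exact pv_bxor_natCast i (N - 1)
  unfold pvOne
  simp only [List.foldl_cons, List.foldl_nil, hb0, hb1]
  rw [hq (i % 2) (pv_mod2_lt i), hq ((i % 2) ^^^ 1) (pv_xorbit_lt i)]
  rw [pvC_split i N hN lv, pvS_split i N hN lv]
  rcases Nat.mod_two_eq_zero_or_one N with hR | hR
  · rw [hR]
    simp
    ring
  · rw [hR]
    simp only [Nat.cast_one, he, true_and, if_true]
    split_ifs with hc <;> (simp only [Prod.mk.injEq]; constructor <;> ring)

lemma pvRows_eq (N i : Nat) (v : Int) :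
    pvRows (i : Int) (N : Int) v = ((pvC i N v, pvS i N v), (pvC i N (v - 1), pvS i N (v - 1))) := by
  induction N using Nat.strong_induction_on generalizing i v with
  | _ N ih =>
    rcases Nat.eq_zero_or_pos N with h0 | hpos
    · subst h0
      rw [pvRows]
      simp [pvC, pvS]
    · rw [pvRows]
      have hn : ¬ ((N : Int) ≤ 0) := by omega
      rw [dif_neg hn]
      simp only [pv_fdiv_natCast, pv_mod_natCastN]
      rw [ih (N / 2) (by omega) (i / 2) (PySem.Int.floordiv v 2)]
      rw [pvOne_correct i N hpos v v (Or.inl rfl),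
          pvOne_correct i N hpos v (v - 1) (Or.inr rfl)]

lemma pv_foldl_ite (l : Int) (i : Int) (L : List Int) (a : Int) :
    L.foldl (fun acc2 j =>
      let energy := PySem.Int.bxor i j
      if energy > l then acc2 + energy else acc2) a
      = a + (L.map (fun j => if PySem.Int.bxor i j > l then PySem.Int.bxor i j else 0)).sum := by
  induction L generalizing a with
  | nil => simp
  | cons x xs ih =>
      simp only [List.foldl_cons, List.map_cons, List.sum_cons, ih]
      split_ifs <;> ring

lemma pv_foldl_add (f : Int → Int) (L : List Int) (a : Int) :
    L.foldl (fun acc x => acc + f x) a = a + (L.map f).sum := by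
  induction L generalizing a with
  | nil => simp
  | cons x xs ih => simp only [List.foldl_cons, List.map_cons, List.sum_cons, ih]; ring

-- One row of A equals one row of B.
lemma pv_row_eq (n l : Int) (k : Nat) :
    ((PySem.List.pyRange 0 n 1).map
      (fun j => if PySem.Int.bxor (k : Int) j > l then PySem.Int.bxor (k : Int) j else 0)).sum
    = (pvRows (k : Int) n l).1.2 := by
  rcases le_or_gt n 0 with hn | hn
  · rw [PySem.List.pyRange_one_eq_nil hn, pvRows, dif_pos hn]
    simp
  · have hn' : n = ((n.toNat : Nat) : Int) := by omega
    rw [hn', pvRows_eq n.toNat k l]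
    rw [PySem.List.pyRange_one]
    have htn : (((n.toNat : Nat) : Int) - 0).toNat = n.toNat := by omega
    rw [htn, List.map_map, pvS_def]
    apply congrArg
    apply List.map_congr_left
    intro j _
    simp [Function.comp]

-- ===== VERDICT (by name: the statement is the Claim_ definition above) =====
theorem calculate_timekeeper_energy_spec : Claim_equal_calculate_timekeeper_energy := by
  intro m n l t _ _
  unfold Spec_calculate_timekeeper_energy calculate_timekeeper_energy calculate_timekeeper_energy_alt
  apply congrArg (fun x => PySem.Int.mod x t)
  have hA : ∀ (L : List Int) (a : Int),
      L.foldl (fun acc i =>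
        (PySem.List.pyRange 0 n 1).foldl (fun acc2 j =>
          let energy := PySem.Int.bxor i j
          if energy > l then acc2 + energy else acc2) acc) a
      = L.foldl (fun acc i => acc +
          ((PySem.List.pyRange 0 n 1).map
            (fun j => if PySem.Int.bxor i j > l then PySem.Int.bxor i j else 0)).sum) a := by
    intro L
    induction L with
    | nil => intro a; rfl
    | cons x xs ih => intro a; rw [List.foldl_cons, List.foldl_cons, pv_foldl_ite, ih]
  rw [hA]
  rw [pv_foldl_add, pv_foldl_add]
  apply congrArg
  apply congrArg
  apply List.map_congr_left
  intro x hx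
  have hx0 : 0 ≤ x := ((PySem.List.mem_pyRange_one).mp hx).1
  obtain ⟨k, rfl⟩ : ∃ k : Nat, x = ((k : Nat) : Int) := ⟨x.toNat, by omega⟩
  exact pv_row_eq n l k
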